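-- pv_equiv track=rewrite | github.com/Michael-huo/ExpHub | scripts/_eval/reporting.py | _collect_warnings
-- ===== SOURCE A (Python) =====
-- def _collect_warnings(traj_metrics, image_metrics, slam_metrics):
--     warnings_list = []
--     for prefix, metrics_obj in [
--         ("traj", traj_metrics),
--         ("image", image_metrics),
--         ("slam", slam_metrics),
--     ]:
--         for item in list((metrics_obj or {}).get("warnings", []) or []):
--             text = "{}: {}".format(prefix, item)
--             if text not in warnings_list:
--                 warnings_list.append(text)
--     return warnings_list
-- ===== SOURCE B (Python) =====
-- def _collect_warnings(traj_metrics, image_metrics, slam_metrics):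
--     def texts(prefix, metrics_obj):
--         return ["{}: {}".format(prefix, item)
--                 for item in (metrics_obj or {}).get("warnings", []) or []]
--
--     def dedup(xs):
--         # quicksort-style partition dedup: keep the head, drop its later
--         # copies by filtering, recurse on what remains
--         if not xs:
--             return []
--         head = xs[0]
--         return [head] + dedup([x for x in xs[1:] if x != head])
--
--     return dedup(texts("traj", traj_metrics)
--                  + texts("image", image_metrics)
--                  + texts("slam", slam_metrics))
-- ===== Notes on version B (the rewrite author's own statement) =====
-- stated objective: alternative
-- what changed: Replaces the incremental append-if-not-seen accumulator loop by flattening all prefixed texts first and then deduplicating with a recursive partition scheme (keep the head, filter out its later copies, recurse) that maintains no seen-set at all.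
import Mathlib
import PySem

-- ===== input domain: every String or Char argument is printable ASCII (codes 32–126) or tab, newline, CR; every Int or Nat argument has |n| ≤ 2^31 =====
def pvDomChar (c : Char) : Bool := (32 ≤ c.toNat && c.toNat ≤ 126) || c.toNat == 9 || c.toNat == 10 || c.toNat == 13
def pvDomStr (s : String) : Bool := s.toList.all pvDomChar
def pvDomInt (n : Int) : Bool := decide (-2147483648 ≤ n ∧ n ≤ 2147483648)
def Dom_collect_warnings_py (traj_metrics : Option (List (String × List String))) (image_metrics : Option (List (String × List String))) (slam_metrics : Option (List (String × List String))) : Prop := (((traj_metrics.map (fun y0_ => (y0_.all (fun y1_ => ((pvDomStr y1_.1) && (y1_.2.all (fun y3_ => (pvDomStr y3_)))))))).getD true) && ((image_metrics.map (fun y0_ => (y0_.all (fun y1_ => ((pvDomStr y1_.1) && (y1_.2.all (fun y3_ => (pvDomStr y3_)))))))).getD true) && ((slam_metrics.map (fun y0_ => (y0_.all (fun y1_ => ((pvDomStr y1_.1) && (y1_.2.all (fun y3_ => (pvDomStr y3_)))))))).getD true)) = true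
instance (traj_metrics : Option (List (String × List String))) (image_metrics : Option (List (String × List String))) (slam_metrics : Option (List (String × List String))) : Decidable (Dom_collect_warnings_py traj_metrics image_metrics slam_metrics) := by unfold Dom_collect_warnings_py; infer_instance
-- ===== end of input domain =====

-- B replaces A's append-if-not-seen accumulator by flatten + recursive partition dedup; same cost, different structure.

-- ===== PORT A =====
-- A: single incremental pass appending each prefixed warning only if not already collected.
def collect_warnings_py (traj_metrics : Option (List (String × List String))) (image_metrics : Option (List (String × List String))) (slam_metrics : Option (List (String × List String))) : List String :=
  [("traj", traj_metrics), ("image", image_metrics), ("slam", slam_metrics)].foldl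
    (fun ws pm =>
      ((PySem.Dict.mk (pm.2.getD [])).getD "warnings" []).foldl
        (fun ws item =>
          let text := pm.1 ++ ": " ++ item
          if ws.contains text then ws else ws ++ [text]) ws)
    []

-- ===== PORT B =====
-- B helper 'texts': one prefix's list of prefixed warning strings.
def pvTexts (pfx : String) (metrics_obj : Option (List (String × List String))) : List String :=
  ((PySem.Dict.mk (metrics_obj.getD [])).getD "warnings" []).map
    (fun item => pfx ++ ": " ++ item)

-- B helper 'dedup': recursive partition dedup — keep the head, filter out its later copies, recurse.
def pvDedupF : List String → List String
  | [] => []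
  | x :: xs => x :: pvDedupF (xs.filter (fun y => y ≠ x))
termination_by l => l.length
decreasing_by
  simpa using le_trans (List.length_filter_le _ _) (Nat.le_of_eq (by simp))

-- B: flatten the three prefixed-text lists, then partition-dedup the result.
def collect_warnings_py_alt (traj_metrics : Option (List (String × List String))) (image_metrics : Option (List (String × List String))) (slam_metrics : Option (List (String × List String))) : List String :=
  pvDedupF (pvTexts "traj" traj_metrics ++ pvTexts "image" image_metrics ++ pvTexts "slam" slam_metrics)

-- ===== PRECONDITION & SPEC =====
def Spec_collect_warnings_py (traj_metrics : Option (List (String × List String))) (image_metrics : Option (List (String × List String))) (slam_metrics : Option (List (String × List String))) (out : List String) : Prop := out = collect_warnings_py_alt traj_metrics image_metrics slam_metrics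
instance (traj_metrics : Option (List (String × List String))) (image_metrics : Option (List (String × List String))) (slam_metrics : Option (List (String × List String))) (out : List String) : Decidable (Spec_collect_warnings_py traj_metrics image_metrics slam_metrics out) := by unfold Spec_collect_warnings_py; infer_instance

-- ===== CLAIM (what is proved, stated in full; the proofs are below) =====
def Claim_equal_collect_warnings_py : Prop := ∀ (traj_metrics : Option (List (String × List String))) (image_metrics : Option (List (String × List String))) (slam_metrics : Option (List (String × List String))), Dom_collect_warnings_py traj_metrics image_metrics slam_metrics → Spec_collect_warnings_py traj_metrics image_metrics slam_metrics (collect_warnings_py traj_metrics image_metrics slam_metrics)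

-- ===== LEMMAS AND PROOFS =====

-- A's inner loop over one metrics list is a Set.update with the mapped texts.
lemma inner_eq_update (pfx : String) (l : List String) (ws : List String) :
    l.foldl (fun ws item =>
        let text := pfx ++ ": " ++ item
        if ws.contains text then ws else ws ++ [text]) ws
      = PySem.Set.update ws (l.map (fun item => pfx ++ ": " ++ item)) := by
  induction l generalizing ws with
  | nil => simp [PySem.Set.update_nil]
  | cons x xs ih =>
      simp only [List.foldl_cons, List.map_cons, PySem.Set.update_cons, ih]
      rfl

-- Filtering out an element already in the set does not change the update.
lemma update_filter_of_contains (x : String) :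
    ∀ (xs s : List String), s.contains x = true →
      PySem.Set.update s (xs.filter (fun y => y ≠ x)) = PySem.Set.update s xs := by
  intro xs
  induction xs with
  | nil => intro s _; rfl
  | cons y ys ih =>
      intro s h
      have hmem : x ∈ s := by simpa using h
      by_cases hy : y = x
      · subst hy
        have hadd : PySem.Set.add s y = s := by simp [PySem.Set.add, hmem]
        simp only [ne_eq, List.filter_cons, not_true_eq_false, decide_false,
          Bool.false_eq_true, if_false, PySem.Set.update_cons, hadd]
        simpa using ih s h
      · have hmem' : x ∈ PySem.Set.add s y := by
          simp only [PySem.Set.add]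
          split <;> simp [hmem]
        have hcontains : (PySem.Set.add s y).contains x = true := by simpa using hmem'
        simp only [ne_eq, List.filter_cons, hy, not_false_eq_true, decide_true,
          if_true, PySem.Set.update_cons]
        exact ih _ hcontains

-- A fresh head commutes out of the update.
lemma update_fresh_cons (x : String) (s : List String) :
    ∀ l : List String, (∀ y ∈ l, y ≠ x) → PySem.Set.update (x :: s) l = x :: PySem.Set.update s l := by
  intro l
  induction l generalizing s with
  | nil => intro _; rfl
  | cons y ys ih =>
      intro h
      have hyx : y ≠ x := h y (by simp)
      have hadd : PySem.Set.add (x :: s) y = x :: PySem.Set.add s y := by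
        by_cases hys : y ∈ s <;> simp [PySem.Set.add, hys, hyx]
      rw [PySem.Set.update_cons, hadd, ih _ (fun z hz => h z (by simp [hz])), PySem.Set.update_cons]

-- Unfolding equations for the well-founded pvDedupF.
lemma pvDedupF_nil : pvDedupF [] = [] := by
  rw [pvDedupF.eq_def]

lemma pvDedupF_cons (x : String) (xs : List String) :
    pvDedupF (x :: xs) = x :: pvDedupF (xs.filter (fun y => y ≠ x)) := by
  rw [pvDedupF.eq_def]

-- The partition dedup computes Python's first-occurrence dedup (set built in order).
lemma pvDedupF_eq_ofList : ∀ l : List String, pvDedupF l = PySem.Set.ofList l := by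
  intro l
  induction hl : l.length using Nat.strong_induction_on generalizing l with
  | _ n ih =>
      cases l with
      | nil => rw [pvDedupF_nil]; rfl
      | cons x xs =>
          have hlen : (xs.filter (fun y => y ≠ x)).length < n := by
            subst hl
            exact Nat.lt_succ_of_le (List.length_filter_le _ _)
          have hrec := ih _ hlen (xs.filter (fun y => y ≠ x)) rfl
          have hofl : PySem.Set.ofList (x :: xs) = PySem.Set.update [x] xs := by
            simp [PySem.Set.ofList_eq_foldl, PySem.Set.update, PySem.Set.add]
          rw [pvDedupF_cons, hrec, hofl,
            ← update_filter_of_contains x xs [x] (by simp),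
            update_fresh_cons x [] _ (fun y hy => by simpa using (List.mem_filter.mp hy).2)]
          rfl

-- ===== VERDICT (by name: the statement is the Claim_ definition above) =====
theorem collect_warnings_py_spec : Claim_equal_collect_warnings_py := by
  intro t i s _
  unfold Spec_collect_warnings_py collect_warnings_py collect_warnings_py_alt pvTexts
  simp only [List.foldl_cons, List.foldl_nil, inner_eq_update, pvDedupF_eq_ofList,
    PySem.Set.ofList_append, PySem.Set.update_nil_left]
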